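-- pv_equiv track=rewrite | github.com/A-stick-bug/DMOJ | DMOPC '16 Contest 2 P4 - Zeros.py | solve
-- ===== SOURCE A (Python) =====
-- def solve(z):
--     """Find the maximum n such that n! has <=z trailing zeros."""
--     low = 0
--     high = 28
--     ans = 0
--
--     def count_p5(n):
--         """count the powers of 5 in n!, standard division trick"""
--         total = 0
--         for p5 in range(1, 100):
--             total += n // (5 ** p5)
--         return total
--
--     while low <= high:
--         mid = (low + high) // 2
--         if count_p5(mid) <= z:
--             ans = mid
--             low = mid + 1
--         else:
--             high = mid - 1
--     return ans
-- ===== SOURCE B (Python) =====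
-- def solve(z):
--     """Find the maximum n such that n! has <=z trailing zeros."""
--
--     def count_p5(n):
--         """count the powers of 5 in n!, standard division trick"""
--         total = 0
--         for p5 in range(1, 100):
--             total += n // (5 ** p5)
--         return total
--
--     ans = 0
--     for n in range(29):
--         if count_p5(n) <= z:
--             ans = n
--     return ans
-- ===== Notes on version B (the rewrite author's own statement) =====
-- stated objective: simpler
-- what changed: Replaced the binary search over [0,28] by a single linear scan that overwrites ans on every n with count_p5(n) <= z, returning the last (largest) qualifying n.
import Mathlib
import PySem

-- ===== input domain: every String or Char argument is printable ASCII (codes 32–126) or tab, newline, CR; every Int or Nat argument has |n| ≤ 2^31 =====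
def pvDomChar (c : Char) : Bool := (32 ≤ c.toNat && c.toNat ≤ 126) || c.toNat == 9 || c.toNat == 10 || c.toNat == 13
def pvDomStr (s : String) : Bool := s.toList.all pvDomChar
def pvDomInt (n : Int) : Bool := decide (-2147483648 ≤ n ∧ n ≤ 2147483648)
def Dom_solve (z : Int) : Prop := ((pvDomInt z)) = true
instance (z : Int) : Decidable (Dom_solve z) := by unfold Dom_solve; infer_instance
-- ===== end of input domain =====

set_option maxRecDepth 10000


-- B replaces A's binary search over [0,28] with a single linear scan recording the last qualifying n (simpler; same result).

-- ===== PORT A =====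
-- inner helper count_p5 of A: total += n // 5**p5 for p5 in range(1,100)
def count_p5 (n : Int) : Int :=
  (PySem.List.pyRange 1 100 1).foldl
    (fun total p5 => total + PySem.Int.floordiv n ((5 : Int) ^ p5.toNat)) 0
    -- p5 ranges over 1..99 (positive), so `.toNat` on the exponent is exact

-- the while-loop of A; the fuel only makes the recursion structural and is
-- never exhausted (the search interval shrinks every iteration, ≤ 29 steps)
def solveLoop (z : Int) : Nat → Int → Int → Int → Int
  | 0, _, _, ans => ans
  | fuel + 1, low, high, ans =>
    if low ≤ high then
      let mid := PySem.Int.floordiv (low + high) 2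
      if count_p5 mid ≤ z then solveLoop z fuel (mid + 1) high mid
      else solveLoop z fuel low (mid - 1) ans
    else ans

def solve (z : Int) : Int := solveLoop z 64 0 28 0

-- ===== PORT B =====
-- B's identical helper count_p5 (Source B carries its own copy)
def count_p5_alt (n : Int) : Int :=
  (PySem.List.pyRange 1 100 1).foldl
    (fun total p5 => total + PySem.Int.floordiv n ((5 : Int) ^ p5.toNat)) 0

def solve_alt (z : Int) : Int :=
  (PySem.List.pyRange 0 29 1).foldl
    (fun ans n => if count_p5_alt n ≤ z then n else ans) 0

-- ===== PRECONDITION & SPEC =====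
def Spec_solve (z : Int) (out : Int) : Prop := out = solve_alt z
instance (z : Int) (out : Int) : Decidable (Spec_solve z out) := by unfold Spec_solve; infer_instance

-- ===== CLAIM (what is proved, stated in full; the proofs are below) =====
def Claim_equal_solve : Prop := ∀ (z : Int), Dom_solve z → Spec_solve z (solve z)

-- ===== LEMMAS AND PROOFS =====

theorem count_p5_alt_eq (n : Int) : count_p5_alt n = count_p5 n := rfl

theorem count_p5_bounds (n : Int) (h0 : 0 ≤ n) (h1 : n ≤ 28) :
    0 ≤ count_p5 n ∧ count_p5 n ≤ 6 := by
  interval_cases n <;> decide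

-- the binary search only evaluates the predicate on mid ∈ [0,28]; z enters
-- only through those comparisons, so equivalent predicates give equal runs
theorem solveLoop_congr (z z' : Int)
    (hp : ∀ n : Int, 0 ≤ n → n ≤ 28 → ((count_p5 n ≤ z) ↔ (count_p5 n ≤ z'))) :
    ∀ (fuel : Nat) (low high ans : Int), 0 ≤ low → high ≤ 28 →
      solveLoop z fuel low high ans = solveLoop z' fuel low high ans := by
  intro fuel
  induction fuel with
  | zero => intro low high ans _ _; rfl
  | succ f ih =>
    intro low high ans hlow hhigh
    simp only [solveLoop]
    by_cases hle : low ≤ high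
    · have hmid := PySem.Int.floordiv_two_mid_bounds hle
      simp only [if_pos hle]
      by_cases hc : count_p5 (PySem.Int.floordiv (low + high) 2) ≤ z
      · rw [if_pos hc, if_pos ((hp _ (by omega) (by omega)).mp hc)]
        exact ih _ _ _ (by omega) hhigh
      · rw [if_neg hc, if_neg (fun h => hc ((hp _ (by omega) (by omega)).mpr h))]
        exact ih _ _ _ hlow (by omega)
    · simp [hle]

theorem solve_congr (z z' : Int)
    (hp : ∀ n : Int, 0 ≤ n → n ≤ 28 → ((count_p5 n ≤ z) ↔ (count_p5 n ≤ z'))) :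
    solve z = solve z' :=
  solveLoop_congr z z' hp 64 0 28 0 (by omega) (by omega)

theorem solve_alt_congr (z z' : Int)
    (hp : ∀ n : Int, 0 ≤ n → n ≤ 28 → ((count_p5 n ≤ z) ↔ (count_p5 n ≤ z'))) :
    solve_alt z = solve_alt z' := by
  unfold solve_alt
  have hb : ∀ n ∈ PySem.List.pyRange 0 29 1, 0 ≤ n ∧ n ≤ 28 := by decide
  have : ∀ (l : List Int), (∀ n ∈ l, 0 ≤ n ∧ n ≤ 28) → ∀ (a : Int),
      l.foldl (fun ans n => if count_p5_alt n ≤ z then n else ans) a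
        = l.foldl (fun ans n => if count_p5_alt n ≤ z' then n else ans) a := by
    intro l
    induction l with
    | nil => intro _ _; rfl
    | cons x xs ih =>
      intro hm a
      have hx := hm x (List.mem_cons_self ..)
      have hiff := hp x hx.1 hx.2
      simp only [List.foldl, count_p5_alt_eq]
      by_cases hc : count_p5 x ≤ z
      · rw [if_pos hc, if_pos (hiff.mp hc)]
        exact ih (fun n hn => hm n (List.mem_cons_of_mem _ hn)) _
      · rw [if_neg hc, if_neg (fun h => hc (hiff.mpr h))]
        exact ih (fun n hn => hm n (List.mem_cons_of_mem _ hn)) _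
  exact this _ hb 0

-- ===== VERDICT (by name: the statement is the Claim_ definition above) =====
theorem solve_spec : Claim_equal_solve := by
  unfold Claim_equal_solve Spec_solve
  intro z _
  rcases lt_or_ge z 0 with hz | hz
  · -- all predicates false: behave like z' = -1
    have hp : ∀ n : Int, 0 ≤ n → n ≤ 28 → ((count_p5 n ≤ z) ↔ (count_p5 n ≤ -1)) := by
      intro n h0 h1
      have := count_p5_bounds n h0 h1
      constructor <;> intro h <;> omega
    rw [solve_congr z (-1) hp, solve_alt_congr z (-1) hp]
    decide
  · rcases le_or_gt z 6 with hz6 | hz6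
    · interval_cases z <;> decide
    · -- all predicates true: behave like z' = 6
      have hp : ∀ n : Int, 0 ≤ n → n ≤ 28 → ((count_p5 n ≤ z) ↔ (count_p5 n ≤ 6)) := by
        intro n h0 h1
        have := count_p5_bounds n h0 h1
        constructor <;> intro h <;> omega
      rw [solve_congr z 6 hp, solve_alt_congr z 6 hp]
      decide
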